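-- pv_equiv track=rewrite | github.com/edsimon/adventOfCode2018 | code/day4.py | count_min
-- ===== SOURCE A (Python) =====
-- def count_min(schedual) :
--     mySet = dict()
--     set_minutes = dict()
--     for x, y in schedual.items() :
--         if not x[1] in mySet.keys() :
--             mySet[x[1]] = y
--         elif not len(y) == 0 :
--             mySet[x[1]].append(y[0])
--
--     last_min = 0
--     for key, value in mySet.items():
--         minutes_asleep = [0]*60
--         minutes = 0
--         for val in value :
--             minutes += val[1] - val[0]
--             for i in range( val[0], val[1] ) :
--                 minutes_asleep[i] += 1
--         set_minutes[key] = minutes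
--         if minutes > last_min :
--             guard = key
--             last_min = minutes
--             most_worked_min = minutes_asleep.index(max(minutes_asleep))
--     return guard, most_worked_min
-- ===== SOURCE B (Python) =====
-- def count_min(schedual):
--     # Group the intervals per guard, pick the guard with the largest total
--     # sleep, then build the 60-minute histogram once, for that guard alone.
--     mySet = dict()
--     for x, y in schedual.items():
--         if x[1] not in mySet:
--             mySet[x[1]] = y
--         elif len(y) != 0:
--             mySet[x[1]].append(y[0])
--
--     last_min = 0
--     for key, value in mySet.items():
--         minutes = sum(e - s for s, e in value)
--         if minutes > last_min:
--             guard = key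
--             last_min = minutes
--
--     hist = [0] * 60
--     for s, e in mySet[guard]:
--         for i in range(s, e):
--             hist[i] += 1
--     return guard, hist.index(max(hist))
-- ===== Notes on version B (the rewrite author's own statement) =====
-- stated objective: alternative
-- what changed: A interleaves a 60-bin histogram, its argmax and a set_minutes side table for every guard inside the winner scan; B groups the intervals per guard, scans only the per-guard totals (a plain sum) to pick the winner, and builds the histogram once, afterwards, for the winning guard alone.
import Mathlib
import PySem

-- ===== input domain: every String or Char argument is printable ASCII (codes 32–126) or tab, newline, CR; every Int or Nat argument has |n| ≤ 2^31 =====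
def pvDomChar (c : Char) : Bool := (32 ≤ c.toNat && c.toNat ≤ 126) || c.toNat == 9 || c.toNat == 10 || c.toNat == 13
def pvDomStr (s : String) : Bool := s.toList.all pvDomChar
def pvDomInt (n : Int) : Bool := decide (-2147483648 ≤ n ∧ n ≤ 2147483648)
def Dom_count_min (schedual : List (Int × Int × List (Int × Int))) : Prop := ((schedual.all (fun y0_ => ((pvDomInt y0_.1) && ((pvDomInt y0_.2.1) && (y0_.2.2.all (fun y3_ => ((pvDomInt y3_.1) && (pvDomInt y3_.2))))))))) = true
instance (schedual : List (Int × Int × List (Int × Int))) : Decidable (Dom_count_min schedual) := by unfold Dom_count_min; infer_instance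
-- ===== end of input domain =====

-- B groups the intervals per guard, picks the winner by scanning only the per-guard
-- totals, and builds the 60-minute histogram once, for the winner alone (A interleaves
-- a histogram, its argmax and a set_minutes table for every guard inside the scan).
-- Return-value equivalence only: both Pythons append into the input dict's value lists in place.

-- ===== PORT A =====
-- minutes_asleep[i] += 1  (Python list index; negative wraps; none-case = IndexError, excluded by Pre_)
def pyIncrAt (l : List Int) (i : Int) : List Int :=
  match PySem.List.pyIdx? l.length i with
  | some n => l.set n (l.getD n 0 + 1)
  | none => l

-- grouping loop, shared verbatim by A and B: first entry for a guard keeps its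
-- whole list, later non-empty entries append their head interval y[0]
def mergeStep (d : PySem.Dict Int (List (Int × Int))) (e : Int × Int × List (Int × Int)) :
    PySem.Dict Int (List (Int × Int)) :=
  if !(d.contains e.2.1) then d.insert e.2.1 e.2.2
  else if !(e.2.2.length == 0) then d.modify e.2.1 [] (fun v => v ++ [e.2.2.headD (0, 0)])
  else d

-- A's second loop body: state = (last_min, set_minutes, guard?, most_worked_min?); none = still unbound
def aScanStep (st : Int × PySem.Dict Int Int × Option Int × Option Int)
    (kv : Int × List (Int × Int)) : Int × PySem.Dict Int Int × Option Int × Option Int :=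
  let p := kv.2.foldl (fun (p : Int × List Int) val =>
      (p.1 + (val.2 - val.1),
       (PySem.List.pyRange val.1 val.2 1).foldl (fun ma i => pyIncrAt ma i) p.2))
    (0, List.replicate 60 0)
  let set_minutes := st.2.1.insert kv.1 p.1
  if p.1 > st.1 then
    (p.1, set_minutes, some kv.1,
     some (((PySem.List.index? p.2 ((PySem.List.max? p.2 (fun v => v)).getD 0)).getD 0 : Nat) : Int))
  else (st.1, set_minutes, st.2.2.1, st.2.2.2)

def count_min (schedual : List (Int × Int × List (Int × Int))) : Int × Int :=
  let mySet := schedual.foldl mergeStep PySem.Dict.empty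
  let st := mySet.items.foldl aScanStep (0, PySem.Dict.empty, none, none)
  (st.2.2.1.getD 0, st.2.2.2.getD 0)  -- getD 0: Python raises UnboundLocalError when still unbound (excluded by Pre_)

-- ===== PORT B =====
-- B's winner scan body: minutes = sum(e - s for s, e in value); state = (last_min, guard?)
def bPickStep (st : Int × Option Int) (kv : Int × List (Int × Int)) : Int × Option Int :=
  let minutes := (kv.2.map (fun p => p.2 - p.1)).sum
  if minutes > st.1 then (minutes, some kv.1) else st

def count_min_alt (schedual : List (Int × Int × List (Int × Int))) : Int × Int :=
  let mySet := schedual.foldl mergeStep PySem.Dict.empty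
  let w := mySet.items.foldl bPickStep (0, none)
  let guard := w.2.getD 0  -- getD 0: Python raises NameError when still unbound (excluded by Pre_)
  -- hist loop over mySet[guard] (guard is always a key when bound, so getD is exact here)
  let hist := (mySet.getD guard []).foldl
      (fun h iv => (PySem.List.pyRange iv.1 iv.2 1).foldl (fun h2 i => pyIncrAt h2 i) h)
      (List.replicate 60 0)
  (guard, (((PySem.List.index? hist ((PySem.List.max? hist (fun v => v)).getD 0)).getD 0 : Nat) : Int))

-- ===== PRECONDITION & SPEC =====
-- The interval list both programs actually group for guard g: the whole list of g's first
-- entry, then the head interval of each later non-empty entry of g.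
def pvMerged (s : List (Int × Int × List (Int × Int))) (g : Int) : List (Int × Int) :=
  match s.filter (fun e => e.2.1 == g) with
  | [] => []
  | e :: rest => e.2.2 ++ (rest.filter (fun e' => !(e'.2.2 == []))).map (fun e' => e'.2.2.headD (0, 0))

def pvTotal (s : List (Int × Int × List (Int × Int))) (g : Int) : Int :=
  ((pvMerged s g).map (fun iv => iv.2 - iv.1)).sum

-- Pre_ holds exactly where Python A returns: every minute index A touches is a valid index of a
-- 60-list (otherwise IndexError), and some guard has a positive merged total (otherwise the
-- result variables stay unbound and A raises UnboundLocalError).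
def Pre_count_min (schedual : List (Int × Int × List (Int × Int))) : Prop :=
  (∀ e ∈ schedual, ∀ iv ∈ pvMerged schedual e.2.1, iv.1 < iv.2 → -60 ≤ iv.1 ∧ iv.2 ≤ 60) ∧
  (∃ e ∈ schedual, 0 < pvTotal schedual e.2.1)

instance (schedual : List (Int × Int × List (Int × Int))) : Decidable (Pre_count_min schedual) := by
  unfold Pre_count_min; infer_instance

def pvWitness_count_min : (List (Int × Int × List (Int × Int))) := [(0, 7, [(5, 10)])]

def Spec_count_min (schedual : List (Int × Int × List (Int × Int))) (out : Int × Int) : Prop := out = count_min_alt schedual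
instance (schedual : List (Int × Int × List (Int × Int))) (out : Int × Int) : Decidable (Spec_count_min schedual out) := by unfold Spec_count_min; infer_instance

-- ===== CLAIM (what is proved, stated in full; the proofs are below) =====
def Claim_equal_count_min : Prop := ∀ (schedual : List (Int × Int × List (Int × Int))), Dom_count_min schedual → Pre_count_min schedual → Spec_count_min schedual (count_min schedual)

-- ===== LEMMAS AND PROOFS =====

-- proof-side abbreviations
def pvHeads (s : List (Int × Int × List (Int × Int))) (g : Int) : List (Int × Int) :=
  (s.filter (fun e => e.2.1 == g && !(e.2.2 == []))).map (fun e => e.2.2.headD (0, 0))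

def histUpd (h : List Int) (ivs : List (Int × Int)) : List Int :=
  ivs.foldl (fun ma iv => (PySem.List.pyRange iv.1 iv.2 1).foldl (fun ma2 i => pyIncrAt ma2 i) ma) h

def totalIvs (v : List (Int × Int)) : Int := (v.map (fun iv => iv.2 - iv.1)).sum

def mwmOf (v : List (Int × Int)) : Int :=
  (((PySem.List.index? (histUpd (List.replicate 60 0) v)
      ((PySem.List.max? (histUpd (List.replicate 60 0) v) (fun x => x)).getD 0)).getD 0 : Nat) : Int)

lemma pvMerged_cons (e : Int × Int × List (Int × Int)) (t : List (Int × Int × List (Int × Int))) (g : Int) :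
    pvMerged (e :: t) g = if e.2.1 = g then e.2.2 ++ pvHeads t g else pvMerged t g := by
  by_cases h1 : e.2.1 = g
  · simp only [pvMerged, List.filter_cons, h1, BEq.rfl, if_pos, pvHeads, List.filter_filter]
    rw [show List.filter (fun a => !a.2.2 == [] && a.2.1 == g) t
          = List.filter (fun e => e.2.1 == g && !e.2.2 == []) t
        from List.filter_congr (fun x _ => Bool.and_comm _ _)]
  · simp only [pvMerged, List.filter_cons]
    simp [h1]

lemma pvHeads_cons (e : Int × Int × List (Int × Int)) (t : List (Int × Int × List (Int × Int))) (g : Int) :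
    pvHeads (e :: t) g = (if e.2.1 = g ∧ e.2.2 ≠ [] then [e.2.2.headD (0, 0)] else []) ++ pvHeads t g := by
  simp only [pvHeads, List.filter_cons]
  by_cases h1 : e.2.1 = g <;> by_cases h2 : e.2.2 = [] <;> simp [h1, h2]

lemma mergeStep_keys (d : PySem.Dict Int (List (Int × Int))) (e : Int × Int × List (Int × Int)) :
    (mergeStep d e).keys = PySem.Set.add d.keys e.2.1 := by
  unfold mergeStep
  by_cases hc : d.contains e.2.1
  · rw [PySem.Set.add_of_mem ((PySem.Dict.contains_iff_mem_keys d _).1 hc)]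
    simp only [hc, Bool.not_true, if_neg, Bool.false_eq_true, not_false_iff]
    split_ifs with h2
    · rw [PySem.Dict.keys_modify, PySem.Dict.keys_insert_of_contains]
      simpa using hc
    · rfl
  · have hc' : d.contains e.2.1 = false := by simpa using hc
    rw [PySem.Set.add_of_not_mem (fun hm => hc ((PySem.Dict.contains_iff_mem_keys d _).2 hm))]
    simp only [hc', Bool.not_false, if_pos]
    exact PySem.Dict.keys_insert_of_not_contains d _ hc'

lemma merge_keys (s : List (Int × Int × List (Int × Int))) (d : PySem.Dict Int (List (Int × Int))) :
    (s.foldl mergeStep d).keys = PySem.Set.update d.keys (s.map (fun e => e.2.1)) := by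
  induction s generalizing d with
  | nil => simp [PySem.Set.update_nil]
  | cons e t ih =>
      rw [List.foldl_cons, ih, List.map_cons, PySem.Set.update_cons, mergeStep_keys]

lemma merge_nodup (s : List (Int × Int × List (Int × Int))) (d : PySem.Dict Int (List (Int × Int)))
    (h : d.keys.Nodup) : (s.foldl mergeStep d).keys.Nodup := by
  rw [merge_keys]
  exact PySem.Set.nodup_update _ _ h

lemma merge_getD (s : List (Int × Int × List (Int × Int))) (d : PySem.Dict Int (List (Int × Int))) (g : Int) :
    (d.contains g = true → (s.foldl mergeStep d).getD g [] = d.getD g [] ++ pvHeads s g) ∧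
    (d.contains g = false → (s.foldl mergeStep d).getD g [] = pvMerged s g) := by
  induction s generalizing d with
  | nil =>
      refine ⟨fun _ => by simp [pvHeads], fun hc => ?_⟩
      simp [pvMerged, PySem.Dict.getD_of_not_contains d _ hc]
  | cons e t ih =>
      rw [List.foldl_cons]
      by_cases hc : d.contains e.2.1
      · have hstep : mergeStep d e =
            if !(e.2.2.length == 0) then d.modify e.2.1 [] (fun v => v ++ [e.2.2.headD (0, 0)]) else d := by
          simp [mergeStep, hc]
        by_cases hy : e.2.2 = []
        · rw [hstep, if_neg (by simp [hy])]
          refine ⟨fun hg => ?_, fun hg => ?_⟩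
          · rw [(ih d).1 hg, pvHeads_cons, if_neg (by simp [hy])]
            rfl
          · have hne : e.2.1 ≠ g := fun h => by rw [h] at hc; simp [hg] at hc
            rw [(ih d).2 hg, pvMerged_cons, if_neg hne]
        · rw [hstep, if_pos (by simp [hy])]
          set d' := d.modify e.2.1 [] (fun v => v ++ [e.2.2.headD (0, 0)]) with hd'
          refine ⟨fun hg => ?_, fun hg => ?_⟩
          · have hcg : d'.contains g = true := by
              rw [hd', PySem.Dict.contains_modify]; simp [hg]
            rw [(ih d').1 hcg, pvHeads_cons]
            by_cases hgg : e.2.1 = g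
            · rw [if_pos ⟨hgg, hy⟩, hd', hgg, PySem.Dict.getD_modify_self]
              simp
            · rw [if_neg (by simp [hgg]), hd',
                PySem.Dict.getD_modify, if_neg (Ne.symm hgg)]
              simp
          · have hne : e.2.1 ≠ g := fun h => by rw [h] at hc; simp [hg] at hc
            have hcg : d'.contains g = false := by
              rw [hd', PySem.Dict.contains_modify]
              simp [hg, Ne.symm hne]
            rw [(ih d').2 hcg, pvMerged_cons, if_neg hne]
      · have hc' : d.contains e.2.1 = false := by simpa using hc
        have hstep : mergeStep d e = d.insert e.2.1 e.2.2 := by simp [mergeStep, hc']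
        rw [hstep]
        set d' := d.insert e.2.1 e.2.2 with hd'
        refine ⟨fun hg => ?_, fun hg => ?_⟩
        · have hne : e.2.1 ≠ g := fun h => by rw [h] at hc'; simp [hg] at hc'
          have hcg : d'.contains g = true := by
            rw [hd', PySem.Dict.contains_insert]; simp [hg]
          rw [(ih d').1 hcg, pvHeads_cons, if_neg (by simp [hne]), hd',
            PySem.Dict.getD_insert, if_neg (Ne.symm hne)]
          simp
        · by_cases hgg : e.2.1 = g
          · have hcg : d'.contains g = true := by
              rw [hd', PySem.Dict.contains_insert]; simp [hgg]
            rw [(ih d').1 hcg, pvMerged_cons, if_pos hgg, hd', hgg,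
              PySem.Dict.getD_insert_self]
          · have hcg : d'.contains g = false := by
              rw [hd', PySem.Dict.contains_insert]
              simp [hg, Ne.symm hgg]
            rw [(ih d').2 hcg, pvMerged_cons, if_neg hgg]

-- the winner scans agree: A over (k, value) pairs with its interleaved histogram,
-- B over the same pairs computing only the total
def pvRel (V : Int → List (Int × Int)) (a : Int × PySem.Dict Int Int × Option Int × Option Int)
    (b : Int × Option Int) : Prop :=
  a.1 = b.1 ∧ a.2.2.1 = b.2 ∧ a.2.2.2 = a.2.2.1.map (fun g => mwmOf (V g))

lemma scan_rel (V : Int → List (Int × Int)) (L : List Int)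
    (a : Int × PySem.Dict Int Int × Option Int × Option Int) (b : Int × Option Int)
    (h : pvRel V a b) :
    pvRel V (L.foldl (fun st k => aScanStep st (k, V k)) a)
      (L.foldl (fun st k => bPickStep st (k, V k)) b) := by
  induction L generalizing a b with
  | nil => exact h
  | cons k L ih =>
      rw [List.foldl_cons, List.foldl_cons]
      apply ih
      have hp : ((V k).foldl (fun (p : Int × List Int) val =>
          (p.1 + (val.2 - val.1),
           (PySem.List.pyRange val.1 val.2 1).foldl (fun ma i => pyIncrAt ma i) p.2))
          (0, List.replicate 60 0)) = (totalIvs (V k), histUpd (List.replicate 60 0) (V k)) := by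
        refine (PySem.List.foldl_prod_mk
          (f := fun (acc : Int) (val : Int × Int) => acc + (val.2 - val.1))
          (g := fun (ma : List Int) (val : Int × Int) =>
            (PySem.List.pyRange val.1 val.2 1).foldl (fun ma i => pyIncrAt ma i) ma)
          (V k) 0 (List.replicate 60 0)).trans ?_
        rw [PySem.List.foldl_add]
        simp [totalIvs, histUpd]
      show pvRel V (aScanStep a (k, V k)) (bPickStep b (k, V k))
      unfold aScanStep bPickStep
      simp only [hp, h.1]
      rw [show ((V k).map (fun p => p.2 - p.1)).sum = totalIvs (V k) from rfl]
      split_ifs with hcond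
      · exact ⟨rfl, rfl, by simp [mwmOf]⟩
      · exact ⟨h.1.symm ▸ rfl, h.2.1, h.2.2⟩

lemma pick_preserve (V : Int → List (Int × Int)) (L : List Int) (b : Int × Option Int)
    (hb : b.2.isSome = true) :
    ((L.foldl (fun st k => bPickStep st (k, V k)) b).2).isSome = true := by
  induction L generalizing b with
  | nil => exact hb
  | cons g L ih =>
      rw [List.foldl_cons]
      by_cases h : ((V g).map (fun p => p.2 - p.1)).sum > b.1
      · have hstep : bPickStep b (g, V g) = (((V g).map (fun p => p.2 - p.1)).sum, some g) := by
          simp [bPickStep, h]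
        rw [hstep]
        exact ih _ rfl
      · have hstep : bPickStep b (g, V g) = b := by simp [bPickStep, h]
        rw [hstep]
        exact ih _ hb

lemma pick_some (V : Int → List (Int × Int)) (L : List Int) (b : Int × Option Int)
    (hb : b.2.isSome = true ∨ b.1 = 0)
    (hex : (∃ g ∈ L, 0 < totalIvs (V g)) ∨ b.2.isSome = true) :
    ((L.foldl (fun st k => bPickStep st (k, V k)) b).2).isSome = true := by
  induction L generalizing b with
  | nil =>
      rcases hex with ⟨g, hg, _⟩ | hs
      · exact absurd hg (List.not_mem_nil)
      · exact hs
  | cons g L ih =>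
      rw [List.foldl_cons]
      by_cases hcond : ((V g).map (fun p => p.2 - p.1)).sum > b.1
      · apply pick_preserve
        simp [bPickStep, hcond]
      · have hstep : bPickStep b (g, V g) = b := by simp [bPickStep, hcond]
        rw [hstep]
        rcases hex with ⟨g0, hg0, hpos⟩ | hs
        · rcases List.mem_cons.1 hg0 with rfl | hmem
          · have hb1 : 0 < b.1 := lt_of_lt_of_le hpos (not_lt.1 hcond)
            rcases hb with hs | hz
            · exact pick_preserve V L b hs
            · omega
          · exact ih b hb (Or.inl ⟨g0, hmem, hpos⟩)
        · exact pick_preserve V L b hs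

-- ===== VERDICT (by name: the statement is the Claim_ definition above) =====
theorem count_min_spec : Claim_equal_count_min := by
  intro s hdom hpre
  unfold Spec_count_min
  obtain ⟨hsafe, e0, he0, hpos⟩ := hpre
  have hnd : (s.foldl mergeStep PySem.Dict.empty).keys.Nodup :=
    merge_nodup s _ PySem.Dict.nodup_keys_empty
  have hDkeys : (s.foldl mergeStep PySem.Dict.empty).keys
      = PySem.Set.ofList (s.map (fun e => e.2.1)) := by
    rw [merge_keys]
    rfl
  have hV : ∀ g, (s.foldl mergeStep PySem.Dict.empty).getD g [] = pvMerged s g := fun g =>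
    (merge_getD s PySem.Dict.empty g).2 rfl
  have hitems := PySem.Dict.items_eq_map_keys (s.foldl mergeStep PySem.Dict.empty) hnd []
  have hrel := scan_rel (fun g => pvMerged s g)
    (s.foldl mergeStep PySem.Dict.empty).keys
    (0, PySem.Dict.empty, none, none) (0, none) ⟨rfl, rfl, rfl⟩
  have hsome : (((s.foldl mergeStep PySem.Dict.empty).keys.foldl
      (fun st k => bPickStep st (k, pvMerged s k)) (0, none)).2).isSome = true := by
    apply pick_some _ _ _ (Or.inr rfl)
    refine Or.inl ⟨e0.2.1, ?_, ?_⟩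
    · rw [hDkeys, PySem.Set.mem_ofList]
      exact List.mem_map.2 ⟨e0, he0, rfl⟩
    · exact hpos
  obtain ⟨wg, hwg⟩ := Option.isSome_iff_exists.mp hsome
  simp only [count_min, count_min_alt]
  rw [hitems]
  simp only [List.foldl_map, hV]
  rw [hrel.2.2, hrel.2.1, hwg]
  simp only [Option.map_some, Option.getD_some]
  rfl
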